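-- pv_equiv track=rewrite | github.com/tvturnhout/nanocoder | nanocoder.py | truncate_shell_output
-- ===== SOURCE A (Python) =====
-- MAX_LINE_LENGTH = 1000   # Lines longer than this get truncated
--
-- MAX_SHELL_OUTPUT_CHARS = 20000  # Total shell output character limit
--
-- def truncate_line(line, max_len=MAX_LINE_LENGTH):
--     """Truncate a single line if too long."""
--     if len(line) <= max_len:
--         return line
--     return line[:max_len] + f" [...+{len(line)-max_len} chars]"
--
-- def truncate_shell_output(output_lines, max_chars=MAX_SHELL_OUTPUT_CHARS):
--     """Truncate shell output: per-line and total character limit."""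
--     truncated_lines = [truncate_line(line) for line in output_lines]
--
--     # Apply line count limit (keep first 10 + last 40 if over 50)
--     if len(truncated_lines) > 50:
--         truncated_lines = truncated_lines[:10] + ["[...TRUNCATED LINES...]"] + truncated_lines[-40:]
--
--     # Apply total character limit
--     result = []
--     total_chars = 0
--     for i, line in enumerate(truncated_lines):
--         if total_chars + len(line) > max_chars:
--             remaining = len(truncated_lines) - i
--             result.append(f"[...TRUNCATED: {remaining} more lines, ~{(sum(len(l) for l in truncated_lines[i:]))//1000}k chars...]")
--             break
--         result.append(line)
--         total_chars += len(line) + 1  # +1 for newline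
--
--     return result
-- ===== SOURCE B (Python) =====
-- MAX_LINE_LENGTH = 1000   # Lines longer than this get truncated
--
-- MAX_SHELL_OUTPUT_CHARS = 20000  # Total shell output character limit
--
-- def truncate_line(line, max_len=MAX_LINE_LENGTH):
--     """Truncate a single line if too long."""
--     if len(line) <= max_len:
--         return line
--     return line[:max_len] + f" [...+{len(line)-max_len} chars]"
--
-- def truncate_shell_output(output_lines, max_chars=MAX_SHELL_OUTPUT_CHARS):
--     """Truncate shell output: per-line and total character limit."""
--     tl = [truncate_line(line) for line in output_lines]
--
--     # Apply line count limit (keep first 10 + last 40 if over 50)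
--     if len(tl) > 50:
--         tl = tl[:10] + ["[...TRUNCATED LINES...]"] + tl[-40:]
--
--     # Apply total character limit via prefix sums (one newline charged per line).
--     lens = [len(l) for l in tl]
--     pre = []
--     acc = 0
--     for n in lens:
--         acc += n + 1
--         pre.append(acc)
--     # Line i fits iff pre[i] <= max_chars + 1; prefix sums are strictly
--     # increasing, so the cut index is just the count of fitting positions.
--     cut = sum(1 for p in pre if p <= max_chars + 1)
--     if cut == len(tl):
--         return tl
--     return tl[:cut] + [
--         f"[...TRUNCATED: {len(tl) - cut} more lines, ~{sum(lens[cut:]) // 1000}k chars...]"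
--     ]
-- ===== Notes on version B (the rewrite author's own statement) =====
-- stated objective: alternative
-- what changed: Phase 3 replaces the sequential accumulate-and-break loop by building the prefix-sum table of line weights (len+1), computing the cut index as the count of prefix sums that fit within max_chars+1 (valid because prefix sums are strictly increasing), and assembling the result by slicing.
import Mathlib
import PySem

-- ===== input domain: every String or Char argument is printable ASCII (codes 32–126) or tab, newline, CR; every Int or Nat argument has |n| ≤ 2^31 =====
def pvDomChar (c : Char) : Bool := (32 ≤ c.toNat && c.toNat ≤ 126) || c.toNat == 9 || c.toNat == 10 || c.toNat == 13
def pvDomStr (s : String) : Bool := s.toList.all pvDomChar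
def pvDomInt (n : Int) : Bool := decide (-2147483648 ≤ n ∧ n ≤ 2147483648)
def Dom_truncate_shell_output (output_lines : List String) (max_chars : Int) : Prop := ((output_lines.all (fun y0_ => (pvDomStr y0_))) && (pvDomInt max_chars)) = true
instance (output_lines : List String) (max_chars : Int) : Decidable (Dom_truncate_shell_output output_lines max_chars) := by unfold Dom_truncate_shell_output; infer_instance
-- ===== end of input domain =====

-- B replaces A's accumulate-and-break loop by a prefix-sum table and a count of fitting positions (alternative decomposition, same cost).

-- ===== PORT A =====
-- truncate_line (shared helper of Source A and Source B, identical code in both)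
def pvTruncLine (line : String) : String :=
  if PySem.Str.len line ≤ 1000 then line
  else PySem.Str.slice line none (some 1000) ++ " [...+" ++ PySem.Int.toStr (PySem.Str.len line - 1000) ++ " chars]"

-- sum(len(l) for l in ts)
def pvSumLens (ts : List String) : Int := (ts.map PySem.Str.len).sum

-- A's phase-3 for-loop with break, on the remaining list (remaining = len - i, suffix sum over tl[i:])
def pvLoopA (max_chars : Int) : List String → Int → List String
  | [], _ => []
  | l :: rest, total =>
    if total + PySem.Str.len l > max_chars then
      ["[...TRUNCATED: " ++ PySem.Int.toStr ((l :: rest).length : Int) ++ " more lines, ~" ++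
        PySem.Int.toStr (PySem.Int.floordiv (pvSumLens (l :: rest)) 1000) ++ "k chars...]"]
    else l :: pvLoopA max_chars rest (total + PySem.Str.len l + 1)

def truncate_shell_output (output_lines : List String) (max_chars : Int) : List String :=
  let tl0 := output_lines.map pvTruncLine
  let tl := if tl0.length > 50 then
      PySem.List.slice tl0 none (some 10) ++ ["[...TRUNCATED LINES...]"] ++ PySem.List.slice tl0 (some (-40)) none
    else tl0
  pvLoopA max_chars tl 0

-- ===== PORT B =====
def truncate_shell_output_alt (output_lines : List String) (max_chars : Int) : List String :=
  let tl0 := output_lines.map pvTruncLine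
  let tl := if tl0.length > 50 then
      PySem.List.slice tl0 none (some 10) ++ ["[...TRUNCATED LINES...]"] ++ PySem.List.slice tl0 (some (-40)) none
    else tl0
  let lens := tl.map PySem.Str.len
  -- pre/acc loop building the prefix sums of (n + 1)
  let pre := (lens.foldl (fun (s : List Int × Int) n => (s.1 ++ [s.2 + n + 1], s.2 + n + 1)) ([], 0)).1
  -- cut = sum(1 for p in pre if p <= max_chars + 1)
  let cut := pre.countP (fun p => decide (p ≤ max_chars + 1))
  if cut = tl.length then tl
  else tl.take cut ++ ["[...TRUNCATED: " ++ PySem.Int.toStr ((tl.length : Int) - (cut : Int)) ++ " more lines, ~" ++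
    PySem.Int.toStr (PySem.Int.floordiv ((lens.drop cut).sum) 1000) ++ "k chars...]"]

-- ===== PRECONDITION & SPEC =====
def Spec_truncate_shell_output (output_lines : List String) (max_chars : Int) (out : List String) : Prop := out = truncate_shell_output_alt output_lines max_chars
instance (output_lines : List String) (max_chars : Int) (out : List String) : Decidable (Spec_truncate_shell_output output_lines max_chars out) := by unfold Spec_truncate_shell_output; infer_instance

-- ===== CLAIM (what is proved, stated in full; the proofs are below) =====
def Claim_equal_truncate_shell_output : Prop := ∀ (output_lines : List String) (max_chars : Int), Dom_truncate_shell_output output_lines max_chars → Spec_truncate_shell_output output_lines max_chars (truncate_shell_output output_lines max_chars)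

-- ===== LEMMAS AND PROOFS =====

-- structural view of B's prefix-sum loop
def pvPrefixes (a : Int) : List Int → List Int
  | [] => []
  | n :: r => (a + n + 1) :: pvPrefixes (a + n + 1) r

theorem pvFoldPre (lens : List Int) (acc0 : List Int) (a : Int) :
    (lens.foldl (fun (s : List Int × Int) n => (s.1 ++ [s.2 + n + 1], s.2 + n + 1)) (acc0, a)).1
      = acc0 ++ pvPrefixes a lens := by
  induction lens generalizing acc0 a with
  | nil => simp [pvPrefixes]
  | cons n r ih => simp [List.foldl, pvPrefixes, ih]

theorem pvCountZero (M : Int) (lens : List Int) (a : Int)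
    (hn : ∀ n ∈ lens, 0 ≤ n) (h : M ≤ a) :
    (pvPrefixes a lens).countP (fun p => decide (p ≤ M)) = 0 := by
  induction lens generalizing a with
  | nil => simp [pvPrefixes]
  | cons n r ih =>
    have h0 : 0 ≤ n := hn n (by simp)
    simp only [pvPrefixes, List.countP_cons]
    rw [ih (a + n + 1) (fun m hm => hn m (by simp [hm])) (by omega)]
    simp
    omega

theorem pvMain (mc : Int) (ts : List String) (tot : Int) :
    pvLoopA mc ts tot =
      (let lens := ts.map PySem.Str.len
       let k := (pvPrefixes tot lens).countP (fun p => decide (p ≤ mc + 1))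
       if k = ts.length then ts
       else ts.take k ++ ["[...TRUNCATED: " ++ PySem.Int.toStr ((ts.length : Int) - (k : Int)) ++ " more lines, ~" ++
         PySem.Int.toStr (PySem.Int.floordiv ((lens.drop k).sum) 1000) ++ "k chars...]"]) := by
  induction ts generalizing tot with
  | nil => simp [pvLoopA, pvPrefixes]
  | cons l rest ih =>
    have hlen : (0 : Int) ≤ PySem.Str.len l := by
      simp [PySem.Str.len_eq]
    by_cases hc : tot + PySem.Str.len l > mc
    · have hk : ((pvPrefixes tot ((l :: rest).map PySem.Str.len)).countP (fun p => decide (p ≤ mc + 1))) = 0 := by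
        simp only [List.map_cons, pvPrefixes, List.countP_cons]
        rw [pvCountZero (mc + 1) (rest.map PySem.Str.len) (tot + PySem.Str.len l + 1)
          (by intro n hn; simp only [List.mem_map] at hn; obtain ⟨s, _, rfl⟩ := hn; simp [PySem.Str.len_eq]) (by omega)]
        simp [PySem.Str.len_eq] at hc
        simp
        omega
      simp only [hk]
      have : ¬ (0 = (l :: rest).length) := by simp
      simp only [pvLoopA, if_pos hc, this, if_false]
      simp [pvSumLens]
    · have hhead : (tot + PySem.Str.len l + 1 ≤ mc + 1) := by omega
      simp only [List.map_cons, pvPrefixes, List.countP_cons, decide_eq_true_eq]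
      rw [if_pos hhead]
      simp only [pvLoopA, if_neg hc, ih (tot + PySem.Str.len l + 1)]
      set k' := (pvPrefixes (tot + PySem.Str.len l + 1) (rest.map PySem.Str.len)).countP (fun p => decide (p ≤ mc + 1)) with hk'
      by_cases he : k' = rest.length
      · simp [he]
      · have hne : ¬ (k' + 1 = (l :: rest).length) := by simp [List.length_cons]; omega
        simp only [if_neg he, if_neg hne]
        simp only [List.take_succ_cons, List.drop_succ_cons, List.length_cons, List.cons_append]
        congr 3
        push_cast
        ring_nf

-- ===== VERDICT (by name: the statement is the Claim_ definition above) =====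
theorem truncate_shell_output_spec : Claim_equal_truncate_shell_output := by
  intro output_lines max_chars _
  unfold Spec_truncate_shell_output truncate_shell_output truncate_shell_output_alt
  simp only
  rw [pvFoldPre _ [] 0, List.nil_append, pvMain]
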